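-- pv_equiv track=rewrite | github.com/AB-2304/AB-2304 | yahtzee2.py | yahtzee
-- ===== SOURCE A (Python) =====
-- from collections import Counter
--
-- def yahtzee(roll: tuple) -> int:
--     """
--     Returns 50 if the roll is a Yahtzee (all dice in the roll have the same
--     face value). Otherwise, returns 0.
--     """
--     Total = 0
--     c=Counter(roll)  # counts the frequency of elements in roll
--     counts = set(c.values())  # makes a set with frequency values
--     # iterate over the set and returns 50 points if frequency is 5
--     for i in counts:
--         if i == 5:
--             Total += 50
--     return Total
-- ===== SOURCE B (Python) =====
-- def yahtzee(roll: tuple) -> int: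
--     """
--     Returns 50 if some face value occurs exactly 5 times in the roll, else 0.
--     Sorts a copy of the roll and scans it once, tracking consecutive-run lengths.
--     """
--     s = sorted(roll)
--     if not s:
--         return 0
--     prev = s[0]
--     run = 1
--     found = False
--     for x in s[1:]:
--         if x == prev:
--             run += 1
--         else:
--             if run == 5:
--                 found = True
--             prev = x
--             run = 1
--     if run == 5:
--         found = True
--     return 50 if found else 0
-- ===== Notes on version B (the rewrite author's own statement) =====
-- stated objective: alternative
-- what changed: Replaces the Counter frequency table and the loop over the set of counts by sorting a copy of the roll and scanning it once for a consecutive run of length exactly 5.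
import Mathlib
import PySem

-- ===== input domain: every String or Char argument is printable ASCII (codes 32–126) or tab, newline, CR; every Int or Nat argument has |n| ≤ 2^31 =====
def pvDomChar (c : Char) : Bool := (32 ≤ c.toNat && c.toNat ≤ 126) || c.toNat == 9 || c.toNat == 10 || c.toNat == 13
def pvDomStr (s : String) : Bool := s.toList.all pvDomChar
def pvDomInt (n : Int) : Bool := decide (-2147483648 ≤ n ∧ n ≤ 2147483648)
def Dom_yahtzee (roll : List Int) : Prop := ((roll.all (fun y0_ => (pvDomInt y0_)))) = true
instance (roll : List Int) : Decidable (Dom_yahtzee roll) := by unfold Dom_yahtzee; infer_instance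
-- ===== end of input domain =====

-- B replaces A's Counter + set-of-counts loop by a sort and a single run-length scan (alternative algorithm, same result).

-- ===== PORT A =====
-- c = Counter(roll); counts = set(c.values()); for i in counts: if i == 5: Total += 50
-- (the iteration order of the Python set does not affect Total: at most one element of a set equals 5)
def yahtzee (roll : List Int) : Int :=
  let c := PySem.Dict.counter roll
  let counts := PySem.Set.ofList c.values
  counts.foldl (fun t i => if i == 5 then t + 50 else t) 0

-- ===== PORT B =====
-- single left-to-right pass over the sorted copy, tracking prev, run length, and a found flag
def pvRunScan (prev run : Int) (found : Bool) : List Int → Bool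
  | [] => found || (run == 5)
  | x :: xs =>
      if x == prev then pvRunScan prev (run + 1) found xs
      else pvRunScan x 1 (found || (run == 5)) xs

def yahtzee_alt (roll : List Int) : Int :=
  match PySem.List.sorted roll (fun x => x) false with
  | [] => 0
  | x :: xs => if pvRunScan x 1 false xs then 50 else 0

-- ===== PRECONDITION & SPEC =====
def Spec_yahtzee (roll : List Int) (out : Int) : Prop := out = yahtzee_alt roll
instance (roll : List Int) (out : Int) : Decidable (Spec_yahtzee roll out) := by unfold Spec_yahtzee; infer_instance

-- ===== CLAIM (what is proved, stated in full; the proofs are below) =====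
def Claim_equal_yahtzee : Prop := ∀ (roll : List Int), Dom_yahtzee roll → Spec_yahtzee roll (yahtzee roll)

-- ===== LEMMAS AND PROOFS =====

-- count of a in b :: l when a ≠ b (orientation-fitted wrapper around List.count_cons)
lemma count_cons_ne (a b : Int) (l : List Int) (h : a ≠ b) :
    List.count a (b :: l) = List.count a l := by
  simp [Ne.symm h]

-- A's loop over the (duplicate-free) set of counts is the indicator of 5 being one of the counts
lemma foldl_add50_nodup (l : List Int) (hnd : l.Nodup) (t : Int) :
    l.foldl (fun t i => if i == 5 then t + 50 else t) t
      = if (5 : Int) ∈ l then t + 50 else t := by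
  induction l generalizing t with
  | nil => simp
  | cons a l ih =>
    rcases List.nodup_cons.mp hnd with ⟨ha, hnd'⟩
    by_cases h : a = (5 : Int)
    · subst h
      rw [List.foldl_cons, ih hnd']
      simp [ha]
    · rw [List.foldl_cons, ih hnd']
      simp [h, Ne.symm h]

-- run-length scan on a sorted tail: found flag, the pending run, or a later run of length 5
lemma pvRunScan_iff (l : List Int) (prev run : Int) (found : Bool)
    (hs : l.Pairwise (· ≤ ·)) (hp : ∀ y ∈ l, prev ≤ y) :
    pvRunScan prev run found l = true ↔
      found = true ∨ run + (l.count prev : Int) = 5 ∨ ∃ v ∈ l, v ≠ prev ∧ (l.count v : Int) = 5 := by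
  induction l generalizing prev run found with
  | nil => simp [pvRunScan]
  | cons x xs ih =>
    rcases List.pairwise_cons.mp hs with ⟨hx, hs'⟩
    by_cases hxp : x = prev
    · subst hxp
      have hih := ih x (run + 1) found hs' hx
      rw [pvRunScan, if_pos (by simp), hih]
      constructor
      · rintro (h | h | ⟨v, hv, hvx, hc⟩)
        · exact Or.inl h
        · refine Or.inr (Or.inl ?_)
          rw [List.count_cons_self]; push_cast; omega
        · refine Or.inr (Or.inr ⟨v, List.mem_cons_of_mem _ hv, hvx, ?_⟩)
          rw [count_cons_ne v x xs hvx]; exact hc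
      · rintro (h | h | ⟨v, hv, hvx, hc⟩)
        · exact Or.inl h
        · refine Or.inr (Or.inl ?_)
          rw [List.count_cons_self] at h; omega
        · rcases List.mem_cons.mp hv with rfl | hv'
          · exact absurd rfl hvx
          · refine Or.inr (Or.inr ⟨v, hv', hvx, ?_⟩)
            rw [count_cons_ne v x xs hvx] at hc; exact hc
    · have hlt : prev < x := lt_of_le_of_ne (hp x (List.mem_cons_self)) (Ne.symm hxp)
      have hnot : prev ∉ x :: xs := by
        intro hm
        rcases List.mem_cons.mp hm with rfl | hm'
        · exact absurd rfl hxp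
        · have := hx prev hm'; omega
      have hxmem : prev ∉ xs := fun hm => hnot (List.mem_cons_of_mem _ hm)
      have hih := ih x 1 (found || (run == 5)) hs' hx
      rw [pvRunScan, if_neg (by simp [hxp]), hih]
      have hcount0 : (x :: xs).count prev = 0 := List.count_eq_zero.mpr hnot
      constructor
      · rintro (h | h | ⟨v, hv, hvx, hc⟩)
        · rcases Bool.or_eq_true_iff.mp h with h | h
          · exact Or.inl h
          · refine Or.inr (Or.inl ?_)
            have : run = 5 := by exact_mod_cast of_decide_eq_true h
            rw [hcount0]; omega
        · refine Or.inr (Or.inr ⟨x, List.mem_cons_self, Ne.symm (ne_of_lt hlt), ?_⟩)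
          rw [List.count_cons_self]; push_cast; omega
        · have hvp : v ≠ prev := by
            intro h; subst h; exact hxmem hv
          refine Or.inr (Or.inr ⟨v, List.mem_cons_of_mem _ hv, hvp, ?_⟩)
          rw [count_cons_ne v x xs hvx]; exact hc
      · rintro (h | h | ⟨v, hv, hvp, hc⟩)
        · exact Or.inl (by simp [h])
        · rw [hcount0] at h
          refine Or.inl ?_
          have : run = 5 := by omega
          simp [this]
        · rcases List.mem_cons.mp hv with rfl | hv'
          · refine Or.inr (Or.inl ?_)
            rw [List.count_cons_self] at hc; push_cast at hc ⊢; omega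
          · by_cases hvx : v = x
            · subst hvx
              refine Or.inr (Or.inl ?_)
              rw [List.count_cons_self] at hc; push_cast at hc ⊢; omega
            · refine Or.inr (Or.inr ⟨v, hv', hvx, ?_⟩)
              rw [count_cons_ne v x xs hvx] at hc; exact hc

-- the common characterisation: some value occurs exactly 5 times in roll
lemma yahtzee_eq_indicator (roll : List Int) :
    yahtzee roll = if ∃ v ∈ roll, roll.count v = 5 then 50 else 0 := by
  unfold yahtzee
  rw [foldl_add50_nodup _ (PySem.Set.nodup_ofList _) 0]
  have hvals : (PySem.Dict.counter roll).values
      = (PySem.Set.ofList roll).map (fun k => (roll.count k : Int)) := by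
    show ((PySem.Dict.counter roll).items).map (·.2) = _
    rw [PySem.Dict.items_counter]
    simp
  have hiff : (5 : Int) ∈ PySem.Set.ofList (PySem.Dict.counter roll).values
      ↔ ∃ v ∈ roll, roll.count v = 5 := by
    rw [PySem.Set.mem_ofList, hvals]
    simp only [List.mem_map, PySem.Set.mem_ofList]
    constructor
    · rintro ⟨v, hv, hc⟩; exact ⟨v, hv, by exact_mod_cast hc⟩
    · rintro ⟨v, hv, hc⟩; exact ⟨v, hv, by exact_mod_cast hc⟩
  simp only [hiff, zero_add]

lemma yahtzee_alt_eq_indicator (roll : List Int) :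
    yahtzee_alt roll = if ∃ v ∈ roll, roll.count v = 5 then 50 else 0 := by
  have hperm0 : (PySem.List.sorted roll (fun x => x) false).Perm roll :=
    PySem.List.sorted_perm roll _ false
  have hpair0 : (PySem.List.sorted roll (fun x => x) false).Pairwise (· ≤ ·) := by
    simpa using PySem.List.sorted_pairwise roll (fun x => x)
  unfold yahtzee_alt
  cases hsl : PySem.List.sorted roll (fun x => x) false with
  | nil =>
    rw [hsl] at hperm0
    have : roll = [] := (List.Perm.nil_eq hperm0).symm
    subst this; simp
  | cons x xs =>
    rw [hsl] at hperm0 hpair0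
    rcases List.pairwise_cons.mp hpair0 with ⟨hx, hs'⟩
    have hiff := pvRunScan_iff xs x 1 false hs' hx
    have key : pvRunScan x 1 false xs = true ↔ ∃ v ∈ roll, roll.count v = 5 := by
      rw [hiff]
      constructor
      · rintro (h | h | ⟨v, hv, hvx, hc⟩)
        · simp at h
        · refine ⟨x, hperm0.mem_iff.mp List.mem_cons_self, ?_⟩
          rw [← hperm0.count_eq, List.count_cons_self]
          have : ((xs.count x : Int)) = 4 := by omega
          omega
        · refine ⟨v, hperm0.mem_iff.mp (List.mem_cons_of_mem _ hv), ?_⟩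
          rw [← hperm0.count_eq, count_cons_ne v x xs hvx]; exact_mod_cast hc
      · rintro ⟨v, hv, hc⟩
        rw [← hperm0.count_eq v] at hc
        by_cases hvx : v = x
        · subst hvx
          rw [List.count_cons_self] at hc
          refine Or.inr (Or.inl ?_); omega
        · have hv' : v ∈ xs := by
            rcases List.mem_cons.mp (hperm0.mem_iff.mpr hv) with rfl | h
            · exact absurd rfl hvx
            · exact h
          refine Or.inr (Or.inr ⟨v, hv', hvx, ?_⟩)
          rw [count_cons_ne v x xs hvx] at hc; exact_mod_cast hc
    simp only [key]

-- ===== VERDICT (by name: the statement is the Claim_ definition above) =====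
theorem yahtzee_spec : Claim_equal_yahtzee := by
  intro roll _
  unfold Spec_yahtzee
  rw [yahtzee_eq_indicator, yahtzee_alt_eq_indicator]
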